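-- pv_equiv track=rewrite | github.com/coaspo/rep-b | quizzer/quz/view.py | make_multiple_lines
-- ===== SOURCE A (Python) =====
-- def make_multiple_lines(line: str) -> str:
--     if len(line) < 5:
--         return line
--     paragraph = []
--     is_new_line_added = False
--     line_num = 1
--     for i, c in enumerate(line):
--         paragraph.append(c)
--         if 75 * line_num < i < 90 * line_num and c == ' ':
--             if not is_new_line_added:
--                 line_num += 1
--                 paragraph.append('\n')
--                 is_new_line_added = True
--         else:
--             is_new_line_added = False
--     return ''.join(paragraph)
-- ===== SOURCE B (Python) =====
-- def make_multiple_lines(line: str) -> str: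
--     if len(line) < 5:
--         return line
--     n = len(line)
--     parts = []
--     start = 0
--     line_num = 1
--     lo = 0  # first index not consumed by a run of window-spaces after an insert
--     while True:
--         idx = line.find(' ', max(75 * line_num + 1, lo))
--         if idx == -1 or idx >= 90 * line_num:
--             break
--         parts.append(line[start:idx + 1])
--         parts.append('\n')
--         start = idx + 1
--         line_num += 1
--         j = idx + 1
--         while j < n and line[j] == ' ' and 75 * line_num < j < 90 * line_num:
--             j += 1
--         lo = j
--     parts.append(line[start:])
--     return ''.join(parts)
-- ===== Notes on version B (the rewrite author's own statement) =====
-- stated objective: faster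
-- what changed: Replaces A's per-character scan with mutable flag/line-number state by a loop that jumps directly to the next qualifying space via windowed str.find and copies whole slices between insertion points (skipping the run of in-window spaces that A's flag suppresses).
import Mathlib
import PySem

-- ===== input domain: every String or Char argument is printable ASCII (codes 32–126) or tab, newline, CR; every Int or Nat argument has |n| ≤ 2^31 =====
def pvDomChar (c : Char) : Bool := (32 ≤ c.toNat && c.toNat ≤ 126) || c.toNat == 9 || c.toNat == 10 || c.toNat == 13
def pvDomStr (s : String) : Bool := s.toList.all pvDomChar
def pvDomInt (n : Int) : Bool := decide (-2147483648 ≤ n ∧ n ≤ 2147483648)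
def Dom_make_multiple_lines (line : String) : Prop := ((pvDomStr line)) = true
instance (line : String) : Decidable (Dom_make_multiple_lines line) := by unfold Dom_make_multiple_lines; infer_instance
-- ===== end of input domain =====

-- B replaces A's per-character scan by repeated windowed `str.find` jumps plus slice
-- copies (objective: faster by a constant factor, as measured); equal return value on every input.

-- ===== PORT A =====
-- one iteration of A's `for i, c in enumerate(line)` body; state = (paragraph, is_new_line_added, line_num)
def aStep (s : List Char × Bool × Int) (ic : Int × Char) : List Char × Bool × Int :=
  match s, ic with
  | (para, flag, ln), (i, c) =>
    let para := para ++ [c]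
    if 75 * ln < i ∧ i < 90 * ln ∧ c = ' ' then
      if flag = false then (para ++ ['\n'], true, ln + 1) else (para, flag, ln)
    else (para, false, ln)

def make_multiple_lines (line : String) : String :=
  if line.toList.length < 5 then line
  else String.ofList ((PySem.List.enumerate line.toList 0).foldl aStep ([], false, 1)).1

-- ===== PORT B =====
-- Source B's inner `while j < n and line[j] == ' ' and 75*ln < j < 90*ln: j += 1`
def skipRun (l : List Char) (ln : Nat) (j : Nat) : Nat :=
  if h : j < l.length ∧ l[j]? = some ' ' ∧ 75 * ln < j ∧ j < 90 * ln then skipRun l ln (j + 1)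
  else j
termination_by l.length - j
decreasing_by omega

-- Source B's outer `while True` loop (fuel-bounded transliteration; fuel never runs out for
-- the call below, as proved by the equivalence theorem's induction)
def bLoop (l : List Char) (fuel : Nat) (parts : List Char) (start : Nat) (ln : Nat) (lo : Nat) : List Char :=
  match fuel with
  | 0 => parts ++ l.drop start
  | fuel + 1 =>
    let idx := PySem.Chars.findFrom l [' '] ((max (75 * ln + 1) lo : Nat) : Int)
    if idx = -1 ∨ (90 * ln : Int) ≤ idx then parts ++ l.drop start
    else
      bLoop l fuel (parts ++ PySem.List.slice l (some (start : Int)) (some (idx + 1)) ++ ['\n'])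
        (idx.toNat + 1) (ln + 1) (skipRun l (ln + 1) (idx.toNat + 1))

def make_multiple_lines_alt (line : String) : String :=
  if line.toList.length < 5 then line
  else String.ofList (bLoop line.toList (line.toList.length + 1) [] 0 1 0)

-- ===== PRECONDITION & SPEC =====
def Spec_make_multiple_lines (line : String) (out : String) : Prop := out = make_multiple_lines_alt line
instance (line : String) (out : String) : Decidable (Spec_make_multiple_lines line out) := by unfold Spec_make_multiple_lines; infer_instance

-- ===== CLAIM (what is proved, stated in full; the proofs are below) =====
def Claim_equal_make_multiple_lines : Prop := ∀ (line : String), Dom_make_multiple_lines line → Spec_make_multiple_lines line (make_multiple_lines line)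

-- ===== LEMMAS AND PROOFS =====

lemma prefix_space_iff (l : List Char) (j : Nat) : ([' '] <+: l.drop j) ↔ l[j]? = some ' ' := by
  rw [← List.head?_drop]
  cases l.drop j with
  | nil => simp
  | cons b t => simp [List.cons_prefix_cons, eq_comm]

lemma skipRun_ge (l : List Char) (ln j : Nat) : j ≤ skipRun l ln j := by
  rw [skipRun]
  split
  · exact le_trans (Nat.le_succ j) (skipRun_ge l ln (j + 1))
  · exact le_refl j
termination_by l.length - j
decreasing_by omega

lemma skipRun_le (l : List Char) (ln j : Nat) (h : j ≤ l.length) : skipRun l ln j ≤ l.length := by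
  rw [skipRun]
  split
  · exact skipRun_le l ln (j + 1) (by omega)
  · exact h
termination_by l.length - j
decreasing_by omega

lemma skipRun_run (l : List Char) (ln j : Nat) :
    ∀ m, j ≤ m → m < skipRun l ln j →
      (l[m]? = some ' ' ∧ 75 * ln < m ∧ m < 90 * ln) := by
  intro m hjm hm
  rw [skipRun] at hm
  split at hm
  · rename_i h
    rcases Nat.eq_or_lt_of_le hjm with rfl | hlt
    · exact ⟨h.2.1, h.2.2⟩
    · exact skipRun_run l ln (j + 1) m hlt hm
  · omega
termination_by l.length - j
decreasing_by omega

lemma skipRun_stop (l : List Char) (ln j : Nat) :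
    ¬(skipRun l ln j < l.length ∧ l[skipRun l ln j]? = some ' ' ∧
      75 * ln < skipRun l ln j ∧ skipRun l ln j < 90 * ln) := by
  by_cases h : j < l.length ∧ l[j]? = some ' ' ∧ 75 * ln < j ∧ j < 90 * ln
  · have e : skipRun l ln j = skipRun l ln (j + 1) := by rw [skipRun]; exact dif_pos h
    rw [e]
    exact skipRun_stop l ln (j + 1)
  · have e : skipRun l ln j = j := by rw [skipRun]; exact dif_neg h
    rw [e]
    exact h
termination_by l.length - j
decreasing_by omega

-- the heart of the equivalence: A's remaining per-character scan from position i equals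
-- B's remaining window-jump loop, under the loop invariants relating the two states
lemma main_inv (l : List Char) :
    ∀ k i parts start ln lo flag f,
    i + k = l.length → start ≤ i → 1 ≤ ln → lo ≤ l.length →
    (flag = false → lo ≤ i) →
    (flag = true → i ≤ lo ∧
      (∀ j, i ≤ j → j < lo → (l[j]? = some ' ' ∧ 75 * ln < j ∧ j < 90 * ln)) ∧
      ¬(lo < l.length ∧ l[lo]? = some ' ' ∧ 75 * ln < lo ∧ lo < 90 * ln)) →
    (∀ j, max (75 * ln + 1) lo ≤ j → j < i → j < 90 * ln → l[j]? ≠ some ' ') →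
    l.length - start < f →
    ((PySem.List.enumerate (l.drop i) (i : Int)).foldl aStep
        (parts ++ (l.drop start).take (i - start), flag, (ln : Int))).1
      = bLoop l f parts start ln lo := by
  intro k
  induction k with
  | zero =>
    intro i parts start ln lo flag f hk hsi hln hlo hff hft h4 hf
    have hi : i = l.length := by omega
    subst hi
    rw [List.drop_length]
    simp only [PySem.List.enumerate_nil, List.foldl_nil]
    have htake : (l.drop start).take (l.length - start) = l.drop start := by
      apply List.take_of_length_le
      simp
    rw [htake]
    match f, hf with
    | f + 1, hf =>
      rw [bLoop]
      have hbr : PySem.Chars.findFrom l [' '] ((max (75 * ln + 1) lo : Nat) : Int) = -1 ∨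
          (90 * (ln : Int)) ≤ PySem.Chars.findFrom l [' '] ((max (75 * ln + 1) lo : Nat) : Int) := by
        set a := max (75 * ln + 1) lo with ha
        by_contra hcon
        rw [not_or, not_le] at hcon
        obtain ⟨hne, hlt⟩ := hcon
        by_cases hale : a ≤ l.length
        · obtain ⟨hge, hpre, hmin⟩ := PySem.Chars.findFrom_natCast_spec l [' '] a hale hne
          set idx := PySem.Chars.findFrom l [' '] (a : Int) with hidx
          have h0 : (0 : Int) ≤ idx := le_trans (by positivity) hge
          have hsp : l[idx.toNat]? = some ' ' := (prefix_space_iff l idx.toNat).mp hpre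
          have hlen : idx.toNat < l.length := by
            have := List.getElem?_eq_some_iff.mp hsp
            exact this.1
          exact h4 idx.toNat (by omega) hlen (by omega) hsp
        · have : PySem.Chars.findFrom l [' '] ((a : Nat) : Int) = -1 := by
            simp only [PySem.Chars.findFrom]
            rw [if_pos (by omega)]
          exact hne this
      rw [if_pos hbr]
  | succ k ih =>
    intro i parts start ln lo flag f hk hsi hln hlo hff hft h4 hf
    have hi : i < l.length := by omega
    rw [List.drop_eq_getElem_cons hi, PySem.List.enumerate_cons, List.foldl_cons,
      show ((i : Int) + 1) = ((i + 1 : Nat) : Int) by push_cast; ring]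
    simp only [aStep]
    have hspace_of : l[i] = ' ' → l[i]? = some ' ' := fun h => by
      rw [List.getElem?_eq_getElem hi, h]
    have hacc : parts ++ (l.drop start).take (i - start) ++ [l[i]] =
        parts ++ (l.drop start).take (i + 1 - start) := by
      rw [show i + 1 - start = (i - start) + 1 by omega, List.take_add_one, List.getElem?_drop,
        show start + (i - start) = i by omega, List.getElem?_eq_getElem hi]
      simp
    by_cases hc : 75 * ln < i ∧ i < 90 * ln ∧ l[i] = ' '
    · have hcI : 75 * (ln : Int) < (i : Int) ∧ (i : Int) < 90 * (ln : Int) ∧ l[i] = ' ' :=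
        ⟨by exact_mod_cast hc.1, by exact_mod_cast hc.2.1, hc.2.2⟩
      rw [if_pos hcI]
      cases flag with
      | true =>
        obtain ⟨hilo, hrun, hstop⟩ := hft rfl
        have hilt : i < lo := by
          rcases Nat.eq_or_lt_of_le hilo with h | h
          · exact absurd ⟨h ▸ hi, h ▸ hspace_of hc.2.2, h ▸ hc.1, h ▸ hc.2.1⟩ hstop
          · exact h
        rw [if_neg (by simp), hacc]
        exact ih (i + 1) parts start ln lo true f (by omega) (by omega) hln hlo
          (by intro h; simp at h)
          (fun _ => ⟨by omega, fun j hj1 hj2 => hrun j (by omega) hj2, hstop⟩)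
          (by intro j hjm hji hj90
              exact absurd hjm (by have := Nat.le_max_right (75 * ln + 1) lo; omega))
          hf
      | false =>
        rw [if_pos rfl]
        match f, hf with
        | f + 1, hf =>
          rw [bLoop]
          set a := max (75 * ln + 1) lo with ha
          have halo : a ≤ i := by have := hff rfl; omega
          have hale : a ≤ l.length := by omega
          have hspi : l[i]? = some ' ' := hspace_of hc.2.2
          have hne : PySem.Chars.findFrom l [' '] (a : Int) ≠ -1 := by
            intro h
            apply (PySem.Chars.findFrom_natCast_eq_neg_one_iff l [' '] a hale).mp h
            rw [List.singleton_infix_iff]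
            have hdi : (l.drop a)[i - a]? = some ' ' := by
              rw [List.getElem?_drop, show a + (i - a) = i by omega]; exact hspi
            exact List.mem_of_getElem? hdi
          obtain ⟨hge, hpre, hmin⟩ := PySem.Chars.findFrom_natCast_spec l [' '] a hale hne
          set idx := PySem.Chars.findFrom l [' '] ((a : Nat) : Int) with hidx
          have h0 : (0 : Int) ≤ idx := le_trans (by positivity) hge
          have hlei : idx.toNat ≤ i := by
            by_contra hgt
            exact hmin i (by omega) (by omega) ((prefix_space_iff l i).mpr hspi)
          have hgei : i ≤ idx.toNat := by
            by_contra hlt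
            exact h4 idx.toNat (by omega) (by omega) (by omega)
              ((prefix_space_iff l idx.toNat).mp hpre)
          have hidxi : idx = (i : Int) := by omega
          rw [if_neg (by
            rw [hidxi]
            rintro (h | h)
            · omega
            · have := hc.2.1; omega)]
          rw [hidxi, show ((i : Int) + 1) = ((i + 1 : Nat) : Int) by push_cast; ring,
            PySem.List.slice_natCast, Int.toNat_natCast]
          rw [show (ln : Int) + 1 = ((ln + 1 : Nat) : Int) by push_cast; ring]
          have H := ih (i + 1) (parts ++ (l.drop start).take (i + 1 - start) ++ ['\n'])
            (i + 1) (ln + 1) (skipRun l (ln + 1) (i + 1)) true f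
            (by omega) (by omega) (by omega) (skipRun_le l (ln + 1) (i + 1) (by omega))
            (by intro h; simp at h)
            (fun _ => ⟨skipRun_ge l (ln + 1) (i + 1),
              fun j hj1 hj2 => skipRun_run l (ln + 1) (i + 1) j hj1 hj2,
              skipRun_stop l (ln + 1) (i + 1)⟩)
            (by intro j hjm hji hj90
                exact absurd hjm (by
                  have h1 := Nat.le_max_right (75 * (ln + 1) + 1) (skipRun l (ln + 1) (i + 1))
                  have h2 := skipRun_ge l (ln + 1) (i + 1)
                  omega))
            (by omega)
          rw [show parts ++ (l.drop start).take (i - start) ++ [l[i]] ++ ['\n'] =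
              parts ++ (l.drop start).take (i + 1 - start) ++ ['\n'] from by rw [hacc]]
          simpa using H
    · rw [if_neg (by
        intro h
        exact hc ⟨by exact_mod_cast h.1, by exact_mod_cast h.2.1, h.2.2⟩)]
      have hloi : lo ≤ i := by
        cases flag with
        | true =>
          obtain ⟨hilo, hrun, _⟩ := hft rfl
          by_contra hgt
          obtain ⟨hsp, h75, h90⟩ := hrun i (le_refl i) (by omega)
          apply hc
          refine ⟨h75, h90, ?_⟩
          rw [List.getElem?_eq_getElem hi] at hsp
          exact Option.some.inj hsp
        | false => exact hff rfl
      rw [hacc]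
      exact ih (i + 1) parts start ln lo false f (by omega) (by omega) hln hlo
        (fun _ => by omega)
        (by intro h; simp at h)
        (by intro j hjm hji hj90
            rcases Nat.lt_or_ge j i with hj | hj
            · exact h4 j hjm hj hj90
            · have hji' : j = i := by omega
              subst hji'
              intro hsp
              apply hc
              refine ⟨by have := Nat.le_max_left (75 * ln + 1) lo; omega, hj90, ?_⟩
              rw [List.getElem?_eq_getElem hi] at hsp
              exact Option.some.inj hsp)
        hf

-- ===== VERDICT (by name: the statement is the Claim_ definition above) =====
theorem make_multiple_lines_spec : Claim_equal_make_multiple_lines := by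
  intro line _
  unfold Spec_make_multiple_lines make_multiple_lines make_multiple_lines_alt
  by_cases h : line.toList.length < 5
  · rw [if_pos h, if_pos h]
  · rw [if_neg h, if_neg h]
    congr 1
    have := main_inv line.toList line.toList.length 0 [] 0 1 0 false (line.toList.length + 1)
      (by omega) (by omega) (by omega) (by omega) (fun _ => by omega)
      (by intro h; simp at h) (by intro j hj hj0 _; omega) (by omega)
    simpa using this
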